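-- pv_equiv track=rewrite | github.com/DavidPrtft/x-ray-reader | XRD Reader v2.py | same_disorder
-- ===== SOURCE A (Python) =====
-- def disorder(value):
--     if value[-1].isnumeric():
--         return None
--     else:
--         return value[-1]
--
-- def same_disorder(rows):
--     disorders = [disorder(r) for r in rows]
--     none_count = sum(d == None for d in disorders)
--
--     if none_count >= len(rows) - 1:
--         return True
--
--     x_num = None
--     for x in disorders:
--         if x != None:
--             x_num = x
--             break
--     for x in disorders:
--         if x != x_num and x != None:
--             return False
--     return True
-- ===== SOURCE B (Python) =====
-- def disorder(value):
--     if value[-1].isnumeric():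
--         return None
--     else:
--         return value[-1]
--
-- def same_disorder(rows):
--     s = {disorder(r) for r in rows}
--     s.discard(None)
--     return len(s) <= 1
-- ===== Notes on version B (the rewrite author's own statement) =====
-- stated objective: simpler
-- what changed: Replaces A's none-count plus find-first-non-None plus pairwise-compare loops with one distinct-collection pass: build the set of markers, discard None, and test whether at most one distinct marker remains.
import Mathlib
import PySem

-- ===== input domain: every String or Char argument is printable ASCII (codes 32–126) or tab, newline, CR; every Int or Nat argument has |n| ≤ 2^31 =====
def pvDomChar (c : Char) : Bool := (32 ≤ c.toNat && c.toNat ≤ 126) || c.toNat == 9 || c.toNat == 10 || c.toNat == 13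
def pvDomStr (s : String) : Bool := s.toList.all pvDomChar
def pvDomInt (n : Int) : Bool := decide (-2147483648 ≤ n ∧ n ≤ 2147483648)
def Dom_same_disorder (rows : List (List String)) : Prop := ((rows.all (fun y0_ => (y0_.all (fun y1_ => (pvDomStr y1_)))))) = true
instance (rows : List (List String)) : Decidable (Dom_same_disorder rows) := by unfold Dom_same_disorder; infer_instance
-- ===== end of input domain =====

-- B replaces A's none-count + find-first + pairwise-compare loops by one distinct-collection
-- (set) pass; objective: simpler. Equivalence of return values is proved on Pre_ (no empty row).

-- shared helper: 'disorder' is defined identically in both Pythons.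
-- value[-1] raises IndexError on an empty row (excluded by Pre_); here pyGet? none is
-- conflated with the None marker, exact whenever the row is nonempty.
def pyDisorder (value : List String) : Option String :=
  match PySem.List.pyGet? value (-1) with
  | none => none
  | some s => if PySem.Str.strIsdigit s then none else some s
    -- .isnumeric = .isdigit on the ASCII domain

-- ===== PORT A =====
-- 'for x in disorders: if x != None: x_num = x; break'
def sdLoop1 : List (Option String) → Option String
  | [] => none
  | x :: xs => if x ≠ none then x else sdLoop1 xs

-- 'for x in disorders: if x != x_num and x != None: return False' then 'return True'
def sdLoop2 (x_num : Option String) : List (Option String) → Bool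
  | [] => true
  | x :: xs => if x ≠ x_num ∧ x ≠ none then false else sdLoop2 x_num xs

def same_disorder (rows : List (List String)) : Bool :=
  let disorders := rows.map pyDisorder
  let none_count : Int := (disorders.map (fun d => if d = none then (1 : Int) else 0)).sum
  if none_count ≥ (rows.length : Int) - 1 then true
  else
    let x_num := sdLoop1 disorders
    sdLoop2 x_num disorders

-- ===== PORT B =====
def same_disorder_alt (rows : List (List String)) : Bool :=
  let s : PySem.Set (Option String) := PySem.Set.ofList (rows.map pyDisorder)
  let s := PySem.Set.discard s none
  decide (s.length ≤ 1)

-- ===== PRECONDITION & SPEC =====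
-- Pre_ excludes rows containing an empty row: there 'value[-1]' raises IndexError in both Pythons.
def Pre_same_disorder (rows : List (List String)) : Prop := ∀ r ∈ rows, r ≠ []
instance (rows : List (List String)) : Decidable (Pre_same_disorder rows) := by unfold Pre_same_disorder; infer_instance
def pvWitness_same_disorder : List (List String) := [["a", "x"], ["b", "x"], ["c", "3"]]

def Spec_same_disorder (rows : List (List String)) (out : Bool) : Prop := out = same_disorder_alt rows
instance (rows : List (List String)) (out : Bool) : Decidable (Spec_same_disorder rows out) := by unfold Spec_same_disorder; infer_instance

-- ===== CLAIM (what is proved, stated in full; the proofs are below) =====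
def Claim_equal_same_disorder : Prop := ∀ (rows : List (List String)), Dom_same_disorder rows → Pre_same_disorder rows → Spec_same_disorder rows (same_disorder rows)

-- ===== LEMMAS AND PROOFS =====

-- "all non-None markers are equal"
def sdP (ds : List (Option String)) : Prop :=
  ∀ a ∈ ds, ∀ b ∈ ds, a ≠ none → b ≠ none → a = b

theorem sd_eq_of_len_le_one {α : Type} {l : List α} (h : l.length ≤ 1)
    {a b : α} (ha : a ∈ l) (hb : b ∈ l) : a = b := by
  cases l with
  | nil => simp at ha
  | cons x t =>
    cases t with
    | nil =>
      simp only [List.mem_singleton] at ha hb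
      rw [ha, hb]
    | cons y u => simp at h

theorem sdLoop1_none {ds : List (Option String)} (h : sdLoop1 ds = none) :
    ∀ x ∈ ds, x = none := by
  induction ds with
  | nil => simp
  | cons d ds ih =>
    simp only [sdLoop1] at h
    by_cases hd : d = none
    · rw [if_neg (not_not_intro hd)] at h
      intro x hx
      rcases List.mem_cons.mp hx with rfl | hx
      · exact hd
      · exact ih h x hx
    · rw [if_pos hd] at h
      exact absurd h hd

theorem sdLoop1_some {ds : List (Option String)} {v : String}
    (h : sdLoop1 ds = some v) : some v ∈ ds := by
  induction ds with
  | nil => simp [sdLoop1] at h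
  | cons d ds ih =>
    simp only [sdLoop1] at h
    by_cases hd : d = none
    · rw [if_neg (not_not_intro hd)] at h
      exact List.mem_cons_of_mem _ (ih h)
    · rw [if_pos hd] at h
      exact h ▸ List.mem_cons_self

theorem sdLoop2_true_iff (x_num : Option String) (ds : List (Option String)) :
    sdLoop2 x_num ds = true ↔ ∀ x ∈ ds, x = x_num ∨ x = none := by
  induction ds with
  | nil => simp [sdLoop2]
  | cons d ds ih =>
    simp only [sdLoop2]
    by_cases hd : d ≠ x_num ∧ d ≠ none
    · rw [if_pos hd]
      simp only [Bool.false_eq_true, false_iff]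
      intro h
      rcases h d List.mem_cons_self with h1 | h1
      · exact hd.1 h1
      · exact hd.2 h1
    · rw [if_neg hd, ih]
      constructor
      · intro h x hx
        rcases List.mem_cons.mp hx with rfl | hx
        · rcases not_and_or.mp hd with h1 | h1
          · exact Or.inl (not_not.mp h1)
          · exact Or.inr (not_not.mp h1)
        · exact h x hx
      · intro h x hx
        exact h x (List.mem_cons_of_mem _ hx)

theorem sd_noneCount (ds : List (Option String)) :
    (ds.map (fun d => if d = none then (1 : Int) else 0)).sum
      = (ds.length : Int) - ((ds.filter (fun d => d ≠ none)).length : Int) := by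
  induction ds with
  | nil => simp
  | cons d ds ih =>
    by_cases hd : d = none <;> simp [hd, ih] <;> omega

-- the 'if' condition of A implies sdP
theorem sd_cond_implies (ds : List (Option String))
    (h : ((ds.filter (fun d => d ≠ none)).length : Int) ≤ 1) : sdP ds := by
  intro a ha b hb hna hnb
  have hl : (ds.filter (fun d => d ≠ none)).length ≤ 1 := by exact_mod_cast h
  exact sd_eq_of_len_le_one hl
    (List.mem_filter.mpr ⟨ha, by simpa using hna⟩)
    (List.mem_filter.mpr ⟨hb, by simpa using hnb⟩)

-- A's else branch computes sdP
theorem sd_else_eq (ds : List (Option String)) :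
    sdLoop2 (sdLoop1 ds) ds = true ↔ sdP ds := by
  rw [sdLoop2_true_iff]
  constructor
  · intro h a ha b hb hna hnb
    rcases h a ha with rfl | rfl
    · rcases h b hb with rfl | rfl
      · rfl
      · exact absurd rfl hnb
    · exact absurd rfl hna
  · intro hP x hx
    cases hx1 : sdLoop1 ds with
    | none =>
      exact Or.inr (sdLoop1_none hx1 x hx)
    | some v =>
      by_cases hxn : x = none
      · exact Or.inr hxn
      · exact Or.inl (hP x hx (some v) (sdLoop1_some hx1) hxn (by simp))

-- B computes sdP
theorem sd_alt_eq (ds : List (Option String)) :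
    ((PySem.Set.discard (PySem.Set.ofList ds) none).length ≤ 1) ↔ sdP ds := by
  constructor
  · intro h a ha b hb hna hnb
    exact sd_eq_of_len_le_one h
      ((PySem.Set.mem_discard _ _ _).mpr ⟨(PySem.Set.mem_ofList _ _).mpr ha, hna⟩)
      ((PySem.Set.mem_discard _ _ _).mpr ⟨(PySem.Set.mem_ofList _ _).mpr hb, hnb⟩)
  · intro hP
    have hnd : (PySem.Set.discard (PySem.Set.ofList ds) none).Nodup :=
      PySem.Set.nodup_discard _ _ (PySem.Set.nodup_ofList ds)
    match hl : PySem.Set.discard (PySem.Set.ofList ds) none with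
    | [] => simp
    | [_] => simp
    | x :: y :: t =>
      exfalso
      have hx : x ∈ PySem.Set.discard (PySem.Set.ofList ds) none := by rw [hl]; simp
      have hy : y ∈ PySem.Set.discard (PySem.Set.ofList ds) none := by rw [hl]; simp
      rw [PySem.Set.mem_discard, PySem.Set.mem_ofList] at hx hy
      have : x = y := hP x hx.1 y hy.1 hx.2 hy.2
      rw [hl] at hnd
      exact (List.nodup_cons.mp hnd).1 (this ▸ List.mem_cons_self)

-- unfold the let-bindings of the two ports
theorem same_disorder_eq (rows : List (List String)) :
    same_disorder rows =
      (if ((rows.map pyDisorder).map (fun d => if d = none then (1 : Int) else 0)).sum ≥ (rows.length : Int) - 1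
       then true
       else sdLoop2 (sdLoop1 (rows.map pyDisorder)) (rows.map pyDisorder)) := rfl

theorem same_disorder_alt_eq (rows : List (List String)) :
    same_disorder_alt rows =
      decide ((PySem.Set.discard (PySem.Set.ofList (rows.map pyDisorder)) none).length ≤ 1) := rfl

-- ===== VERDICT (by name: the statement is the Claim_ definition above) =====
theorem same_disorder_spec : Claim_equal_same_disorder := by
  intro rows _ _
  unfold Spec_same_disorder
  rw [same_disorder_eq, same_disorder_alt_eq]
  set ds := rows.map pyDisorder with hds
  have hlen : rows.length = ds.length := by simp [hds]
  rw [sd_noneCount, hlen]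
  by_cases hP : sdP ds
  · have h1 : sdLoop2 (sdLoop1 ds) ds = true := (sd_else_eq ds).mpr hP
    have h2 : ((PySem.Set.discard (PySem.Set.ofList ds) none).length ≤ 1) := (sd_alt_eq ds).mpr hP
    split_ifs <;> simp [h1, h2]
  · have hc : ¬ (((ds.length : Int) - ((ds.filter (fun d => d ≠ none)).length : Int)) ≥ (ds.length : Int) - 1) := by
      intro h
      exact hP (sd_cond_implies ds (by omega))
    rw [if_neg hc]
    have h1 : sdLoop2 (sdLoop1 ds) ds = false := by
      rcases Bool.eq_false_or_eq_true (sdLoop2 (sdLoop1 ds) ds) with h | h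
      · exact absurd ((sd_else_eq ds).mp h) hP
      · exact h
    have h2 : ¬ ((PySem.Set.discard (PySem.Set.ofList ds) none).length ≤ 1) :=
      fun h => hP ((sd_alt_eq ds).mp h)
    simp [h1, h2]
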